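-- pv_equiv track=rewrite | github.com/chernyshovyuri/algoritmus | src/homework_3.py | max_in_range
-- ===== SOURCE A (Python) =====
-- def max_in_range(array: list, start: int,  end: int ) -> str| list| None:
--     if not isinstance(array, list) or not isinstance(start, int) or not isinstance(end, int):
--         raise TypeError()
--
--     if not array:
--         return array
--
--     if start > end or (end+1) > len(array) or start < 0 or end < 0:
--         return None
--
--
--     imax = start
--
--     for i in range(start, end+1, 1):
--         if array[i] > array[imax]:
--             imax = i
--     return f'max elem: {array[imax]}, абсолютная координата: {imax}, Относительная координата: {imax - start}'
-- ===== SOURCE B (Python) =====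
-- def _argmax(lst):
--     # divide and conquer; ties go left, so this yields the FIRST maximum
--     if len(lst) == 1:
--         return lst[0], 0
--     mid = len(lst) // 2
--     lm, li = _argmax(lst[:mid])
--     rm, ri = _argmax(lst[mid:])
--     if rm > lm:
--         return rm, mid + ri
--     return lm, li
--
--
-- def _fmt(m, imax, rel):
--     return f'max elem: {m}, абсолютная координата: {imax}, Относительная координата: {rel}'
--
--
-- def max_in_range(array: list, start: int, end: int) -> str | None:
--     if not isinstance(array, list) or not isinstance(start, int) or not isinstance(end, int):
--         raise TypeError()
--     if 0 <= start <= end < len(array):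
--         m, rel = _argmax(array[start:end + 1])
--         return _fmt(m, start + rel, rel)
--     return None
-- ===== Notes on version B (the rewrite author's own statement) =====
-- stated objective: alternative
-- what changed: Replaces the index-tracking scan over array[start..end] by a divide-and-conquer argmax over the slice (split in half, recurse, ties go left so the first maximum wins), with one inverted bounds guard instead of A's chain of checks.
-- outside the precondition, e.g. on max_in_range([], 0, 0): A returns [], B returns None
import Mathlib
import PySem

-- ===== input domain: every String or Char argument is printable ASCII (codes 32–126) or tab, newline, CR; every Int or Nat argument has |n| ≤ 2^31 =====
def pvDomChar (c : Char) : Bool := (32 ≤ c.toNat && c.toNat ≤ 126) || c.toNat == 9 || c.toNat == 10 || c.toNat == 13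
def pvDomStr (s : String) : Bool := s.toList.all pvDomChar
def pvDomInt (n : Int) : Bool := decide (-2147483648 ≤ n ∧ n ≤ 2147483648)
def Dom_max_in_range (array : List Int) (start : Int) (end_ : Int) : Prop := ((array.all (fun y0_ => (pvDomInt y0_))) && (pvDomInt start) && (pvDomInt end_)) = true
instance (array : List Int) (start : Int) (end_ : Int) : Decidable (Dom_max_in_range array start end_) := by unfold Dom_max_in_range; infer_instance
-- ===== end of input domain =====

-- B replaces A's index-tracking scan by a divide-and-conquer argmax over the slice
-- (split in half, recurse, ties go left), with one inverted bounds guard; objective: alternative.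

-- ===== PORT A =====
-- Python's empty-array branch returns the empty LIST (not a string); that input is outside
-- Pre_max_in_range, and the port returns none there.
def max_in_range (array : List Int) (start : Int) (end_ : Int) : Option String :=
  if array = [] then none
  else if start > end_ ∨ end_ + 1 > (array.length : Int) ∨ start < 0 ∨ end_ < 0 then none
  else
    -- indices visited by the loop are all in range under the guard, so pyGetD is exact
    let imax := (PySem.List.pyRange start (end_ + 1) 1).foldl
      (fun imax i => if PySem.List.pyGetD array i 0 > PySem.List.pyGetD array imax 0 then i else imax) start
    some ("max elem: " ++ PySem.Int.toStr (PySem.List.pyGetD array imax 0) ++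
      ", абсолютная координата: " ++ PySem.Int.toStr imax ++
      ", Относительная координата: " ++ PySem.Int.toStr (imax - start))

-- ===== PORT B =====
-- _argmax: Python would recurse forever on [] but is only ever called on a nonempty slice;
-- the `≤ 1` guard (Python tests `== 1`) only makes the port total, it is exact on nonempty lists.
def pvArgmax (l : List Int) : Int × Nat :=
  if l.length ≤ 1 then (l.getD 0 0, 0)
  else
    let mid := l.length / 2
    let L := pvArgmax (l.take mid)
    let R := pvArgmax (l.drop mid)
    if R.1 > L.1 then (R.1, mid + R.2) else L
termination_by l.length
decreasing_by
  · simp only [List.length_take]; omega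
  · simp only [List.length_drop]; omega

def pvFmt (m imax rel : Int) : String :=
  "max elem: " ++ PySem.Int.toStr m ++ ", абсолютная координата: " ++ PySem.Int.toStr imax ++
    ", Относительная координата: " ++ PySem.Int.toStr rel

def max_in_range_alt (array : List Int) (start : Int) (end_ : Int) : Option String :=
  if 0 ≤ start ∧ start ≤ end_ ∧ end_ < (array.length : Int) then
    let P := pvArgmax (PySem.List.slice array (some start) (some (end_ + 1)))
    some (pvFmt P.1 (start + (P.2 : Int)) (P.2 : Int))
  else none

-- ===== PRECONDITION & SPEC =====
-- Pre_ excludes only the empty list, on which A returns the empty list itself — not a value of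
-- the declared string/None result type — while B naturally returns None.
def Pre_max_in_range (array : List Int) (start : Int) (end_ : Int) : Prop := array ≠ []
instance (array : List Int) (start : Int) (end_ : Int) : Decidable (Pre_max_in_range array start end_) := by unfold Pre_max_in_range; infer_instance
def pvWitness_max_in_range : List Int × Int × Int := ([3, 1, 3], 0, 2)

def Spec_max_in_range (array : List Int) (start : Int) (end_ : Int) (out : Option String) : Prop := out = max_in_range_alt array start end_
instance (array : List Int) (start : Int) (end_ : Int) (out : Option String) : Decidable (Spec_max_in_range array start end_ out) := by unfold Spec_max_in_range; infer_instance

-- ===== CLAIM (what is proved, stated in full; the proofs are below) =====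
def Claim_equal_max_in_range : Prop := ∀ (array : List Int) (start : Int) (end_ : Int), Dom_max_in_range array start end_ → Pre_max_in_range array start end_ → Spec_max_in_range array start end_ (max_in_range array start end_)

-- ===== LEMMAS AND PROOFS =====

-- the Nat-indexed version of A's argmax loop over a list l (relative indices)
def foldN (l : List Int) : Nat :=
  (List.range l.length).foldl (fun r k => if l.getD k 0 > l.getD r 0 then k else r) 0

-- the fold only looks at getD-values at indices below n
lemma fold_cong (l1 l2 : List Int) (n : Nat) (h : ∀ k < n, l1.getD k 0 = l2.getD k 0) :
    ∀ (L : List Nat) (r : Nat), (∀ k ∈ L, k < n) → r < n →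
      L.foldl (fun r k => if l1.getD k 0 > l1.getD r 0 then k else r) r
        = L.foldl (fun r k => if l2.getD k 0 > l2.getD r 0 then k else r) r := by
  intro L
  induction L with
  | nil => intro r _ _; rfl
  | cons k L ih =>
    intro r hL hr
    have hk : k < n := hL k (List.mem_cons_self)
    simp only [List.foldl_cons, h k hk, h r hr]
    split
    · exact ih k (fun x hx => hL x (List.mem_cons_of_mem _ hx)) hk
    · exact ih r (fun x hx => hL x (List.mem_cons_of_mem _ hx)) hr

lemma max?_append_singleton (l : List Int) (x m : Int)
    (h : PySem.List.max? l (fun y => y) = some m) :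
    PySem.List.max? (l ++ [x]) (fun y => y) = some (max m x) := by
  cases l with
  | nil => simp [PySem.List.max?] at h
  | cons a t =>
    rw [PySem.List.max?_id_cons] at h
    rw [List.cons_append, PySem.List.max?_id_cons, List.foldl_append]
    simp [Option.some_inj.mp h]

lemma foldN_core : ∀ (l : List Int), l ≠ [] →
    PySem.List.index? l ((PySem.List.max? l (fun y => y)).getD 0) = some (foldN l) ∧
    l.getD (foldN l) 0 = (PySem.List.max? l (fun y => y)).getD 0 ∧
    foldN l < l.length := by
  intro l
  induction l using List.reverseRecOn with
  | nil => intro h; exact absurd rfl h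
  | append_singleton l' x ih =>
    intro _
    rcases eq_or_ne l' [] with h' | h'
    · subst h'
      refine ⟨?_, ?_, ?_⟩ <;>
        simp [foldN, PySem.List.max?_id_cons, List.range_succ]
    · obtain ⟨hidx, hgF, hFlt⟩ := ih h'
      cases hmx : PySem.List.max? l' (fun y => y) with
      | none => exact absurd ((PySem.List.max?_eq_none_iff l' (fun y => y)).mp hmx) h'
      | some m' =>
        rw [hmx] at hidx hgF
        simp only [Option.getD_some] at hidx hgF
        have hmem : m' ∈ l' := PySem.List.max?_mem hmx
        have hall : ∀ y ∈ l', y ≤ m' := PySem.List.max?_isMax hmx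
        have hpos : 0 < l'.length := List.length_pos_of_ne_nil h'
        have hgD : ∀ k < l'.length, (l' ++ [x]).getD k 0 = l'.getD k 0 := by
          intro k hk; rw [List.getD_append _ _ _ _ hk]
        have hgDn : (l' ++ [x]).getD l'.length 0 = x := by
          rw [List.getD_append_right _ _ _ _ (le_refl _)]; simp
        have hmax := max?_append_singleton l' x m' hmx
        have hfold : foldN (l' ++ [x]) = if x > m' then l'.length else foldN l' := by
          unfold foldN
          rw [List.length_append, List.length_singleton, List.range_succ, List.foldl_append]
          rw [fold_cong (l' ++ [x]) l' l'.length hgD _ 0 (fun k hk => List.mem_range.mp hk) hpos]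
          simp only [List.foldl_cons, List.foldl_nil]
          have hFN : List.foldl (fun r k => if l'.getD k 0 > l'.getD r 0 then k else r) 0
              (List.range l'.length) = foldN l' := rfl
          rw [hFN, hgDn, hgD (foldN l') hFlt, hgF]
        by_cases hx : x > m'
        · rw [if_pos hx] at hfold
          have hxn : x ∉ l' := fun hmem' => absurd (hall x hmem') (not_le.mpr hx)
          refine ⟨?_, ?_, ?_⟩
          · rw [hmax, hfold]
            simp only [Option.getD_some, max_eq_right (le_of_lt hx)]
            exact PySem.List.index?_append_singleton_self l' x hxn
          · rw [hmax, hfold, hgDn]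
            simp [max_eq_right (le_of_lt hx)]
          · rw [hfold]; simp
        · rw [if_neg hx] at hfold
          have hmm : max m' x = m' := max_eq_left (not_lt.mp hx)
          refine ⟨?_, ?_, ?_⟩
          · rw [hmax, hfold]
            simp only [Option.getD_some, hmm]
            rw [PySem.List.index?_append_of_mem [x] hmem]
            exact hidx
          · rw [hmax, hfold, hgD (foldN l') hFlt, hgF]
            simp [hmm]
          · rw [hfold]; simp; omega

lemma fold_shift (array sub : List Int) (s0 n : Nat)
    (hsub : ∀ k : Nat, k < n → PySem.List.pyGetD array ((s0 : Int) + k) 0 = sub.getD k 0) :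
    ∀ (L : List Nat) (j : Nat), (∀ k ∈ L, k < n) → j < n →
      L.foldl (fun (r : Int) (k : Nat) =>
          if PySem.List.pyGetD array ((s0 : Int) + k) 0 > PySem.List.pyGetD array r 0
          then (s0 : Int) + k else r) ((s0 : Int) + j)
      = (s0 : Int) + (L.foldl (fun r k => if sub.getD k 0 > sub.getD r 0 then k else r) j : Nat) := by
  intro L
  induction L with
  | nil => intro j _ _; rfl
  | cons k L ih =>
    intro j hL hj
    have hk : k < n := hL k (List.mem_cons_self)
    simp only [List.foldl_cons, hsub k hk, hsub j hj]
    split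
    · exact ih k (fun x hx => hL x (List.mem_cons_of_mem _ hx)) hk
    · exact ih j (fun x hx => hL x (List.mem_cons_of_mem _ hx)) hj

lemma foldl_max_max (u : List Int) : ∀ (c a : Int), u.foldl max (max c a) = max c (u.foldl max a) := by
  induction u with
  | nil => intro c a; rfl
  | cons v u ih =>
    intro c a
    simp only [List.foldl_cons, max_assoc, ih]

lemma max?_id_append (a b : List Int) (ma mb : Int)
    (ha : PySem.List.max? a (fun y => y) = some ma)
    (hb : PySem.List.max? b (fun y => y) = some mb) :
    PySem.List.max? (a ++ b) (fun y => y) = some (max ma mb) := by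
  cases a with
  | nil => simp [PySem.List.max?] at ha
  | cons x t =>
    rw [PySem.List.max?_id_cons] at ha
    cases b with
    | nil => simp [PySem.List.max?] at hb
    | cons y u =>
      rw [PySem.List.max?_id_cons] at hb
      rw [List.cons_append, PySem.List.max?_id_cons, List.foldl_append,
        Option.some_inj.mp ha, List.foldl_cons, foldl_max_max]
      rw [Option.some_inj.mp hb]

lemma index?_append_right (a b : List Int) (x : Int) (j : Nat)
    (hx : x ∉ a) (hb : PySem.List.index? b x = some j) :
    PySem.List.index? (a ++ b) x = some (a.length + j) := by
  obtain ⟨pre, suf, hsplit, hlen, hnot⟩ := (PySem.List.index?_eq_some_iff b x j).mp hb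
  refine (PySem.List.index?_eq_some_iff (a ++ b) x (a.length + j)).mpr
    ⟨a ++ pre, suf, ?_, ?_, ?_⟩
  · rw [hsplit, List.append_assoc]
  · rw [List.length_append, hlen]
  · intro hmem
    rcases List.mem_append.mp hmem with h | h
    · exact hx h
    · exact hnot h

-- the divide-and-conquer argmax returns the maximum and its first position
lemma pvArgmax_spec : ∀ (n : Nat) (l : List Int), l.length = n → l ≠ [] →
    PySem.List.max? l (fun y => y) = some (pvArgmax l).1 ∧
    PySem.List.index? l (pvArgmax l).1 = some (pvArgmax l).2 := by
  intro n
  induction n using Nat.strong_induction_on with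
  | _ n ih =>
    intro l hlen hne
    by_cases h1 : l.length ≤ 1
    · obtain ⟨a, rfl⟩ : ∃ a, l = [a] := by
        cases l with
        | nil => exact absurd rfl hne
        | cons a t =>
          cases t with
          | nil => exact ⟨a, rfl⟩
          | cons b u => simp at h1
      rw [pvArgmax]
      simp [PySem.List.max?_id_cons, PySem.List.index?_cons_self]
    · push_neg at h1
      rw [pvArgmax, if_neg (by omega)]
      set mid := l.length / 2 with hmid
      have hmid1 : 1 ≤ mid := by omega
      have hmidlt : mid < l.length := by omega
      have hta : (l.take mid).length = mid := by
        rw [List.length_take]; omega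
      have htb : (l.drop mid).length = l.length - mid := by
        rw [List.length_drop]
      have hane : l.take mid ≠ [] := by
        intro h; rw [h] at hta; simp at hta; omega
      have hbne : l.drop mid ≠ [] := by
        intro h; rw [h] at htb; simp at htb; omega
      obtain ⟨hLmax, hLidx⟩ := ih (l.take mid).length (by omega) (l.take mid) rfl hane
      obtain ⟨hRmax, hRidx⟩ := ih (l.drop mid).length (by omega) (l.drop mid) rfl hbne
      have hmax := max?_id_append (l.take mid) (l.drop mid) _ _ hLmax hRmax
      rw [List.take_append_drop] at hmax
      by_cases hcmp : (pvArgmax (l.drop mid)).1 > (pvArgmax (l.take mid)).1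
      · rw [if_pos hcmp]
        have hnotin : (pvArgmax (l.drop mid)).1 ∉ l.take mid := by
          intro hmem
          exact absurd (PySem.List.max?_isMax hLmax _ hmem) (not_le.mpr hcmp)
        constructor
        · rw [hmax]
          simp [max_eq_right (le_of_lt hcmp)]
        · have h := index?_append_right (l.take mid) (l.drop mid) _ _ hnotin hRidx
          rw [List.take_append_drop, hta] at h
          simpa using h
      · rw [if_neg hcmp]
        constructor
        · rw [hmax]
          simp [max_eq_left (not_lt.mp hcmp)]
        · have h := PySem.List.index?_append_of_mem (l.drop mid) (PySem.List.max?_mem hLmax)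
          rw [List.take_append_drop] at h
          rw [h]
          exact hLidx

-- ===== VERDICT (by name: the statement is the Claim_ definition above) =====
theorem max_in_range_spec : Claim_equal_max_in_range := by
  intro array start end_ _ hpre
  unfold Spec_max_in_range max_in_range max_in_range_alt
  rw [if_neg hpre]
  by_cases hg : start > end_ ∨ end_ + 1 > (array.length : Int) ∨ start < 0 ∨ end_ < 0
  · rw [if_pos hg, if_neg (by push_neg; omega)]
  · rw [if_neg hg, if_pos (by push_neg at hg; omega)]
    push_neg at hg
    obtain ⟨h1, h2, h3, h4⟩ := hg
    obtain ⟨s0, rfl⟩ : ∃ s0 : Nat, start = (s0 : Int) :=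
      ⟨start.toNat, (Int.toNat_of_nonneg h3).symm⟩
    set n := (end_ + 1 - (s0 : Int)).toNat with hn
    have hslice : PySem.List.slice array (some (s0 : Int)) (some (end_ + 1)) =
        (array.drop s0).take n := by
      rw [PySem.List.slice_toNat array h3 (by omega)]
      have h5 : ((s0 : Int)).toNat = s0 := by omega
      have h6 : (end_ + 1).toNat - s0 = n := by omega
      rw [h5, h6]
    set sub := (array.drop s0).take n with hsubdef
    have hsublen : sub.length = n := by
      rw [hsubdef, List.length_take, List.length_drop]
      omega
    have hsubne : sub ≠ [] := by
      intro h
      rw [h] at hsublen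
      simp at hsublen
      omega
    have hsub : ∀ k : Nat, k < n → PySem.List.pyGetD array ((s0 : Int) + k) 0 = sub.getD k 0 := by
      intro k hk
      have hcast : ((s0 : Int) + k) = ((s0 + k : Nat) : Int) := by push_cast; ring
      rw [hcast, PySem.List.pyGetD_natCast, hsubdef]
      simp [List.getD_eq_getElem?_getD, List.getElem?_drop, hk]
    obtain ⟨hidx, hgF, hFlt⟩ := foldN_core sub hsubne
    have hFltn : foldN sub < n := hsublen ▸ hFlt
    have hrange : PySem.List.pyRange (s0 : Int) (end_ + 1) 1
        = (List.range n).map (fun k : Nat => (s0 : Int) + (k : Int)) := by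
      rw [PySem.List.pyRange_one]
    have hFN : (List.range n).foldl (fun r k => if sub.getD k 0 > sub.getD r 0 then k else r) 0
        = foldN sub := by
      rw [foldN, hsublen]
    have hfoldA :
        (PySem.List.pyRange (s0 : Int) (end_ + 1) 1).foldl
          (fun imax i => if PySem.List.pyGetD array i 0 > PySem.List.pyGetD array imax 0
            then i else imax) (s0 : Int)
        = (s0 : Int) + (foldN sub : Nat) := by
      rw [hrange, List.foldl_map]
      have h0 := fold_shift array sub s0 n hsub (List.range n) 0
        (fun k hk => List.mem_range.mp hk) (by omega)
      rw [hFN] at h0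
      simpa using h0
    -- B's argmax agrees with the max?/index? characterisation
    obtain ⟨hBmax, hBidx⟩ := pvArgmax_spec sub.length sub rfl hsubne
    have hBm : (pvArgmax sub).1 = (PySem.List.max? sub (fun y => y)).getD 0 := by
      rw [hBmax]; rfl
    have hB2 : (pvArgmax sub).2 = foldN sub := by
      have := hBidx
      rw [hBm, hidx] at this
      exact (Option.some_inj.mp this).symm
    have hm : PySem.List.pyGetD array ((s0 : Int) + (foldN sub : Nat)) 0
        = (pvArgmax sub).1 := by
      rw [hsub _ hFltn, hgF, hBm]
    have hsub0 : ((s0 : Int) + (foldN sub : Nat)) - (s0 : Int) = ((foldN sub : Nat) : Int) := by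
      ring
    simp only [hslice, hfoldA, hm, hB2, hsub0, pvFmt]
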